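-- pv_equiv track=rewrite | github.com/Owhen-Min/TIL | ALGORITHM/SSAFY/SWEA/21428/sol1.py | build_sparse_table
-- ===== SOURCE A (Python) =====
-- def build_sparse_table(arr):
--     N = len(arr)
--     log = [0] * (N + 1)
--     for i in range(2, N + 1):
--         log[i] = log[i // 2] + 1
--
--     K = log[N] + 1
--     st = [[0] * K for _ in range(N)]
--
--     for i in range(N):
--         st[i][0] = arr[i]
--
--     j = 1
--     while (1 << j) <= N:
--         i = 0
--         while (i + (1 << j) - 1) < N:
--             st[i][j] = max(st[i][j - 1], st[i + (1 << (j - 1))][j - 1])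
--             i += 1
--         j += 1
--
--     return st, log
-- ===== SOURCE B (Python) =====
-- def build_sparse_table(arr):
--     N = len(arr)
--     log = [i.bit_length() - 1 if i else 0 for i in range(N + 1)]
--     K = log[N] + 1
--     st = [[max(arr[i:i + (1 << j)]) if i + (1 << j) <= N else 0
--            for j in range(K)]
--           for i in range(N)]
--     return st, log
-- ===== Notes on version B (the rewrite author's own statement) =====
-- stated objective: simpler
-- what changed: Replaces A's imperative doubling DP (each sparse-table column computed from the previous one via two while-loops and in-place updates) by a single comprehension that fills every cell directly as max(arr[i:i+2**j]), with the log array in closed form via bit_length; same exact matrix including the untouched zero entries.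
import Mathlib
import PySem

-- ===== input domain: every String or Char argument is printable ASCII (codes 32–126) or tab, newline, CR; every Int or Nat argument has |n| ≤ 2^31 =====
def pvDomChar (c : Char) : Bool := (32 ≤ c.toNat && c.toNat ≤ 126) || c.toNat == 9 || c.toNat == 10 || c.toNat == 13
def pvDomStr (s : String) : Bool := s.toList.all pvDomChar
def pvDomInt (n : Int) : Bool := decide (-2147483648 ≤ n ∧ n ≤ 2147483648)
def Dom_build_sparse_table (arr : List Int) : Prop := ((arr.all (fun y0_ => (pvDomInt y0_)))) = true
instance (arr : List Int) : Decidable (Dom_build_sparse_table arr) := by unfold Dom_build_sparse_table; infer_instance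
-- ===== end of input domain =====

-- B fills each sparse-table cell directly as max(arr[i:i+2^j]) (log via bit_length) instead of A's
-- column-by-column doubling DP: simpler one-shot comprehension, same exact matrix (alternative, not faster).


-- ===== PORT A =====
-- log = [0]*(N+1); for i in range(2, N+1): log[i] = log[i//2] + 1
-- (indices i and i//2 are always in range, so List.set / List.getD are exact here)
def pvLogLoopA (N : Nat) : List Int :=
  (List.range' 2 (N + 1 - 2)).foldl
    (fun lg i => lg.set i (lg.getD (i / 2) 0 + 1))
    (List.replicate (N + 1) 0)

-- st = [[0]*K for _ in range(N)]; for i in range(N): st[i][0] = arr[i]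
def pvStInitA (arr : List Int) (K : Nat) : List (List Int) :=
  (List.range arr.length).foldl
    (fun st i => st.set i ((st.getD i []).set 0 (arr.getD i 0)))
    (List.replicate arr.length (List.replicate K 0))

-- inner while: while (i + (1 << j) - 1) < N: st[i][j] = max(st[i][j-1], st[i+(1<<(j-1))][j-1]); i += 1
-- (the fuel argument only makes the while-loop structurally total; it is always at least the
-- iteration count at the call sites, so the loop runs exactly as in Python)
def pvInnerA (N j : Nat) (fuel : Nat) (st : List (List Int)) (i : Nat) : List (List Int) :=
  match fuel with
  | 0 => st
  | fuel + 1 =>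
    if i + 2 ^ j - 1 < N then
      pvInnerA N j fuel
        (st.set i ((st.getD i []).set j
          (max ((st.getD i []).getD (j - 1) 0)
               ((st.getD (i + 2 ^ (j - 1)) []).getD (j - 1) 0)))) (i + 1)
    else st

-- outer while: while (1 << j) <= N: …inner…; j += 1  (fuel as above)
def pvOuterA (N : Nat) (fuel : Nat) (st : List (List Int)) (j : Nat) : List (List Int) :=
  match fuel with
  | 0 => st
  | fuel + 1 =>
    if 2 ^ j ≤ N then pvOuterA N fuel (pvInnerA N j N st 0) (j + 1) else st

def build_sparse_table (arr : List Int) : List (List Int) × List Int :=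
  let N := arr.length
  let log := pvLogLoopA N
  -- K = log[N] + 1 : log entries are ≥ 0, so toNat is exact
  let K := (log.getD N 0 + 1).toNat
  let st := pvStInitA arr K
  (pvOuterA N (N + 1) st 1, log)

-- ===== PORT B =====
-- max(xs) on the (always nonempty) slice; Python max of an int list
def pvMaxB (l : List Int) : Int :=
  match PySem.List.max? l (fun y => y) with
  | some m => m
  | none => 0

def build_sparse_table_alt (arr : List Int) : List (List Int) × List Int :=
  let N := arr.length
  -- i.bit_length() - 1 = Nat.log2 i for i ≥ 1 (exact library correspondence)
  let log : List Int := (List.range (N + 1)).map (fun i => if i = 0 then 0 else (Nat.log2 i : Int))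
  -- K = log[N] + 1 : log entries are ≥ 0, so toNat is exact
  let K := (log.getD N 0 + 1).toNat
  let st := (List.range N).map (fun i =>
    (List.range K).map (fun j =>
      if i + 2 ^ j ≤ N then
        pvMaxB (PySem.List.slice arr (some (i : Int)) (some ((i + 2 ^ j : Nat) : Int)))
      else 0))
  (st, log)

-- ===== PRECONDITION & SPEC =====
def Spec_build_sparse_table (arr : List Int) (out : List (List Int) × List Int) : Prop := out = build_sparse_table_alt arr
instance (arr : List Int) (out : List (List Int) × List Int) : Decidable (Spec_build_sparse_table arr out) := by unfold Spec_build_sparse_table; infer_instance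

-- ===== CLAIM (what is proved, stated in full; the proofs are below) =====
def Claim_equal_build_sparse_table : Prop := ∀ (arr : List Int), Dom_build_sparse_table arr → Spec_build_sparse_table arr (build_sparse_table arr)

-- ===== LEMMAS AND PROOFS =====

-- running max of the nonempty list (value of Python's max on it)
def pvLmax : List Int → Int
  | [] => 0
  | x :: t => t.foldl max x

-- the intended table entry
def pvT (arr : List Int) (i j : Nat) : Int :=
  if i + 2 ^ j ≤ arr.length then pvLmax ((arr.drop i).take (2 ^ j)) else 0

-- table with columns < jdone filled
def pvTbl (arr : List Int) (K jdone : Nat) : List (List Int) :=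
  (List.range arr.length).map (fun i =>
    (List.range K).map (fun j => if j < jdone then pvT arr i j else 0))

-- column j additionally filled for rows < icut
def pvTblP (arr : List Int) (K j icut : Nat) : List (List Int) :=
  (List.range arr.length).map (fun i =>
    (List.range K).map (fun j' => if j' < j ∨ (j' = j ∧ i < icut) then pvT arr i j' else 0))

theorem pv_getD_map_range {α : Type} (f : Nat → α) (n i : Nat) (d : α) (h : i < n) :
    ((List.range n).map f).getD i d = f i := by
  rw [List.getD_eq_getElem ((List.range n).map f) d (by simpa using h)]
  simp

theorem pv_set_map_range {α : Type} (f : Nat → α) (n i : Nat) (v : α) :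
    ((List.range n).map f).set i v =
      (List.range n).map (fun k => if k = i then v else f k) := by
  apply List.ext_getElem (by simp)
  intro k h1 h2
  simp only [List.getElem_set, List.getElem_map, List.getElem_range]
  rcases eq_or_ne i k with hk | hk
  · simp [hk]
  · rw [if_neg hk, if_neg (Ne.symm hk)]

theorem pv_map_range_congr {α : Type} (f g : Nat → α) (n : Nat)
    (h : ∀ k, k < n → f k = g k) : (List.range n).map f = (List.range n).map g := by
  apply List.map_congr_left
  intro k hk
  exact h k (List.mem_range.mp hk)

theorem pv_ite_ext (P Q : Prop) [Decidable P] [Decidable Q] (v : Int)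
    (h1 : P → Q) (h2 : Q → ¬P → v = 0) : (if P then v else 0) = (if Q then v else 0) := by
  by_cases hp : P
  · rw [if_pos hp, if_pos (h1 hp)]
  · rw [if_neg hp]
    by_cases hq : Q
    · rw [if_pos hq, h2 hq hp]
    · rw [if_neg hq]

theorem pv_foldl_max_max (l : List Int) (a b : Int) :
    l.foldl max (max a b) = max a (l.foldl max b) := by
  induction l generalizing b with
  | nil => simp
  | cons x t ih => simp only [List.foldl_cons, max_assoc, ih]

theorem pv_lmax_append (l₁ l₂ : List Int) (h₁ : l₁ ≠ []) (h₂ : l₂ ≠ []) :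
    pvLmax (l₁ ++ l₂) = max (pvLmax l₁) (pvLmax l₂) := by
  cases l₁ with
  | nil => exact absurd rfl h₁
  | cons x t =>
    cases l₂ with
    | nil => exact absurd rfl h₂
    | cons y s =>
      simp only [pvLmax, List.cons_append, List.foldl_cons, List.foldl_append]
      rw [← pv_foldl_max_max s (t.foldl max x) y]

theorem pv_T_zero (arr : List Int) (i j : Nat) (h : ¬ i + 2 ^ j ≤ arr.length) :
    pvT arr i j = 0 := by rw [pvT, if_neg h]

-- the doubling recurrence computes the direct max
theorem pv_T_combine (arr : List Int) (m i : Nat)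
    (hle : i + 2 ^ (m + 1) ≤ arr.length) :
    max (pvT arr i m) (pvT arr (i + 2 ^ m) m) = pvT arr i (m + 1) := by
  have hp : 1 ≤ 2 ^ m := Nat.one_le_two_pow
  have hsplit : 2 ^ (m + 1) = 2 ^ m + 2 ^ m := by rw [pow_succ]; omega
  have h1 : i + 2 ^ m ≤ arr.length := by omega
  have h2 : i + 2 ^ m + 2 ^ m ≤ arr.length := by omega
  simp only [pvT, if_pos hle, if_pos h1, if_pos h2]
  have htk : (arr.drop i).take (2 ^ (m + 1)) =
      (arr.drop i).take (2 ^ m) ++ ((arr.drop (i + 2 ^ m)).take (2 ^ m)) := by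
    rw [hsplit, List.take_add, List.drop_drop]
  have hne1 : (arr.drop i).take (2 ^ m) ≠ [] := by
    apply List.ne_nil_of_length_pos
    rw [List.length_take, List.length_drop]
    omega
  have hne2 : (arr.drop (i + 2 ^ m)).take (2 ^ m) ≠ [] := by
    apply List.ne_nil_of_length_pos
    rw [List.length_take, List.length_drop]
    omega
  rw [htk, pv_lmax_append _ _ hne1 hne2]

-- ===== log array =====
theorem pv_log2_rec (n : Nat) (h : 2 ≤ n) : Nat.log2 n = Nat.log2 (n / 2) + 1 := by
  rw [Nat.log2_eq_log_two, Nat.log2_eq_log_two, Nat.log_div_base]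
  have := Nat.log_pos (show 1 < 2 by norm_num) h
  omega

theorem pv_logLoopA_partial (N m : Nat) (hm : m ≤ N - 1) :
    (List.range' 2 m).foldl (fun lg i => lg.set i (lg.getD (i / 2) 0 + 1))
        (List.replicate (N + 1) (0 : Int)) =
      (List.range (N + 1)).map (fun i => if i < m + 2 then (Nat.log2 i : Int) else 0) := by
  induction m with
  | zero =>
    simp only [List.range'_zero, List.foldl_nil]
    apply List.ext_getElem (by simp)
    intro k h1 h2
    simp only [List.getElem_replicate, List.getElem_map, List.getElem_range]
    have hz : k < 2 → Nat.log2 k = 0 := by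
      intro hk
      interval_cases k <;> decide
    by_cases hk : k < 2
    · simp [hk, hz hk]
    · simp [hk]
  | succ m ih =>
    rw [List.range'_1_concat, List.foldl_append, ih (by omega), List.foldl_cons, List.foldl_nil]
    have hlt : (2 + m) / 2 < N + 1 := by omega
    rw [pv_getD_map_range _ _ _ _ hlt, pv_set_map_range]
    have hcond : (2 + m) / 2 < m + 2 := by omega
    rw [if_pos hcond]
    apply pv_map_range_congr
    intro k hk
    by_cases hke : k = 2 + m
    · subst hke
      rw [if_pos rfl, if_pos (by omega), pv_log2_rec (2 + m) (by omega)]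
      push_cast
      ring
    · rw [if_neg hke]
      by_cases hk2 : k < m + 2
      · rw [if_pos hk2, if_pos (by omega)]
      · rw [if_neg hk2, if_neg (by omega)]

theorem pv_logLoopA_eq (N : Nat) :
    pvLogLoopA N = (List.range (N + 1)).map (fun i => (Nat.log2 i : Int)) := by
  rw [pvLogLoopA, pv_logLoopA_partial N (N + 1 - 2) (by omega)]
  apply pv_map_range_congr
  intro k hk
  rw [if_pos (by omega)]

-- ===== initial table =====
theorem pv_stInitA_partial (arr : List Int) (K : Nat) (m : Nat) (hm : m ≤ arr.length) :
    (List.range m).foldl (fun st i => st.set i ((st.getD i []).set 0 (arr.getD i 0)))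
        (List.replicate arr.length (List.replicate K (0 : Int))) =
      (List.range arr.length).map (fun i =>
        if i < m then (List.replicate K (0 : Int)).set 0 (arr.getD i 0)
        else List.replicate K 0) := by
  induction m with
  | zero =>
    simp only [List.range_zero, List.foldl_nil]
    apply List.ext_getElem (by simp)
    intro k h1 h2
    simp
  | succ m ih =>
    rw [List.range_succ, List.foldl_append, ih (by omega), List.foldl_cons, List.foldl_nil]
    rw [pv_getD_map_range _ _ _ _ (by omega), pv_set_map_range]
    rw [if_neg (by omega)]
    apply pv_map_range_congr
    intro k hk
    by_cases hke : k = m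
    · subst hke; simp
    · rw [if_neg hke]
      by_cases hk2 : k < m
      · rw [if_pos hk2, if_pos (by omega)]
      · rw [if_neg hk2, if_neg (by omega)]

theorem pv_stInitA_eq (arr : List Int) (K : Nat) (_hK : 1 ≤ K) :
    pvStInitA arr K = pvTbl arr K 1 := by
  rw [pvStInitA, pv_stInitA_partial arr K arr.length le_rfl, pvTbl]
  apply pv_map_range_congr
  intro i hi
  rw [if_pos hi]
  apply List.ext_getElem (by simp)
  intro j h1 h2
  simp only [List.getElem_set, List.getElem_map, List.getElem_range, List.getElem_replicate]
  by_cases hj : 0 = j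
  · subst hj
    rw [if_pos rfl, if_pos (by omega)]
    have hi' : i + 2 ^ 0 ≤ arr.length := by simpa using hi
    rw [pvT, if_pos hi']
    have hdrop : (arr.drop i).take (2 ^ 0) = [arr[i]] := by
      rw [pow_zero, List.take_one, List.head?_drop, List.getElem?_eq_getElem hi]
      rfl
    rw [hdrop, List.getD_eq_getElem arr 0 hi]
    rfl
  · rw [if_neg hj, if_neg (by omega)]

-- ===== inner loop =====
theorem pv_tblP_zero (arr : List Int) (K j : Nat) :
    pvTblP arr K j 0 = pvTbl arr K j := by
  simp only [pvTblP, pvTbl]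
  apply pv_map_range_congr
  intro i _
  apply pv_map_range_congr
  intro j' _
  exact if_congr (by omega) rfl rfl

-- once the write frontier i satisfies i + 2^(m+1) > N, the partial table is the full (m+2)-table
theorem pv_tblP_full (arr : List Int) (K m i : Nat)
    (hstop : arr.length < i + 2 ^ (m + 1)) :
    pvTblP arr K (m + 1) i = pvTbl arr K (m + 2) := by
  simp only [pvTblP, pvTbl]
  apply pv_map_range_congr
  intro i' _
  apply pv_map_range_congr
  intro j' _
  apply pv_ite_ext
  · intro hp
    omega
  · intro hq hnp
    apply pv_T_zero
    have hj : j' = m + 1 := by omega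
    subst hj
    omega

-- one write of the inner loop advances the frontier by one
theorem pv_inner_step (arr : List Int) (K m i : Nat) (hmK : m + 1 < K)
    (hle : i + 2 ^ (m + 1) ≤ arr.length) :
    (pvTblP arr K (m + 1) i).set i
        (((pvTblP arr K (m + 1) i).getD i []).set (m + 1)
          (max (((pvTblP arr K (m + 1) i).getD i []).getD (m + 1 - 1) 0)
               (((pvTblP arr K (m + 1) i).getD (i + 2 ^ (m + 1 - 1)) []).getD (m + 1 - 1) 0))) =
      pvTblP arr K (m + 1) (i + 1) := by
  have hp : 1 ≤ 2 ^ m := Nat.one_le_two_pow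
  have hpow : 2 ^ (m + 1) = 2 ^ m + 2 ^ m := by rw [pow_succ]; omega
  have hiN : i < arr.length := by omega
  have hi2N : i + 2 ^ m < arr.length := by omega
  simp only [Nat.add_sub_cancel, pvTblP]
  rw [pv_getD_map_range _ _ _ _ hiN, pv_getD_map_range _ _ _ _ hi2N,
      pv_getD_map_range _ _ _ _ (show m < K by omega),
      pv_getD_map_range _ _ _ _ (show m < K by omega)]
  have c1 : m < m + 1 ∨ (m = m + 1 ∧ i < i) := Or.inl (by omega)
  have c2 : m < m + 1 ∨ (m = m + 1 ∧ i + 2 ^ m < i) := Or.inl (by omega)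
  rw [if_pos c1, if_pos c2, pv_T_combine arr m i hle, pv_set_map_range, pv_set_map_range]
  apply pv_map_range_congr
  intro i' _
  by_cases hie : i' = i
  · subst hie
    rw [if_pos rfl]
    apply pv_map_range_congr
    intro j' _
    by_cases hje : j' = m + 1
    · subst hje
      rw [if_pos rfl, if_pos (Or.inr ⟨rfl, by omega⟩)]
    · rw [if_neg hje]
      exact if_congr (by omega) rfl rfl
  · rw [if_neg hie]
    apply pv_map_range_congr
    intro j' _
    exact if_congr (by omega) rfl rfl

theorem pv_innerA_eq (arr : List Int) (K m : Nat) (hmK : m + 1 < K) :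
    ∀ fuel i, arr.length - i ≤ fuel →
      pvInnerA arr.length (m + 1) fuel (pvTblP arr K (m + 1) i) i = pvTbl arr K (m + 2) := by
  intro fuel
  induction fuel with
  | zero =>
    intro i hid
    have hp : 1 ≤ 2 ^ (m + 1) := Nat.one_le_two_pow
    rw [pvInnerA]
    exact pv_tblP_full arr K m i (by omega)
  | succ fuel ih =>
    intro i hid
    rw [pvInnerA]
    by_cases hguard : i + 2 ^ (m + 1) - 1 < arr.length
    · rw [if_pos hguard]
      have hp : 1 ≤ 2 ^ (m + 1) := Nat.one_le_two_pow
      have hle : i + 2 ^ (m + 1) ≤ arr.length := by omega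
      rw [pv_inner_step arr K m i hmK hle]
      exact ih (i + 1) (by omega)
    · rw [if_neg hguard]
      have hp : 1 ≤ 2 ^ (m + 1) := Nat.one_le_two_pow
      exact pv_tblP_full arr K m i (by omega)

-- ===== outer loop =====
theorem pv_tbl_stable (arr : List Int) (K j : Nat) (hstop : arr.length < 2 ^ j) :
    pvTbl arr K j = pvTbl arr K K := by
  simp only [pvTbl]
  apply pv_map_range_congr
  intro i _
  apply pv_map_range_congr
  intro j' hj'
  apply pv_ite_ext
  · intro _
    exact hj'
  · intro _ hnp
    apply pv_T_zero
    have hmono : 2 ^ j ≤ 2 ^ j' := Nat.pow_le_pow_right (by norm_num) (by omega)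
    omega

theorem pv_outerA_eq (arr : List Int) (K : Nat) (hK : K = Nat.log2 arr.length + 1) :
    ∀ fuel j, 1 ≤ j → arr.length + 1 - 2 ^ j ≤ fuel →
      pvOuterA arr.length fuel (pvTbl arr K j) j = pvTbl arr K K := by
  intro fuel
  induction fuel with
  | zero =>
    intro j hj hd
    rw [pvOuterA]
    exact pv_tbl_stable arr K j (by omega)
  | succ fuel ih =>
    intro j hj hd
    rw [pvOuterA]
    by_cases hguard : 2 ^ j ≤ arr.length
    · rw [if_pos hguard]
      obtain ⟨m, rfl⟩ : ∃ m, j = m + 1 := ⟨j - 1, by omega⟩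
      have hN0 : arr.length ≠ 0 := by
        have : 1 ≤ 2 ^ (m + 1) := Nat.one_le_two_pow
        omega
      have hjK : m + 1 < K := by
        rw [hK]
        have := (Nat.le_log2 hN0).mpr hguard
        omega
      rw [← pv_tblP_zero arr K (m + 1),
          pv_innerA_eq arr K m hjK arr.length 0 (by omega)]
      have hstep : 2 ^ (m + 1) < 2 ^ (m + 2) :=
        Nat.pow_lt_pow_right (by norm_num) (by omega)
      exact ih (m + 2) (by omega) (by omega)
    · rw [if_neg hguard]
      exact pv_tbl_stable arr K j (by omega)

-- ===== B's entries are pvT =====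
theorem pv_maxB_eq_lmax (l : List Int) : pvMaxB l = pvLmax l := by
  cases l with
  | nil => rfl
  | cons x t =>
    rw [pvMaxB, PySem.List.max?_id_cons]
    rfl

theorem pv_altB_entry (arr : List Int) (i j : Nat) :
    (if i + 2 ^ j ≤ arr.length then
        pvMaxB (PySem.List.slice arr (some (i : Int)) (some ((i + 2 ^ j : Nat) : Int)))
      else 0) = pvT arr i j := by
  rw [pvT]
  by_cases h : i + 2 ^ j ≤ arr.length
  · rw [if_pos h, PySem.List.slice_natCast, pv_maxB_eq_lmax,
        show i + 2 ^ j - i = 2 ^ j from Nat.add_sub_cancel_left i (2 ^ j), if_pos h]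
  · rw [if_neg h, if_neg h]

-- ===== VERDICT (by name: the statement is the Claim_ definition above) =====
theorem build_sparse_table_spec : Claim_equal_build_sparse_table := by
  intro arr _
  unfold Spec_build_sparse_table build_sparse_table build_sparse_table_alt
  show (pvOuterA arr.length (arr.length + 1)
          (pvStInitA arr (((pvLogLoopA arr.length).getD arr.length 0 + 1).toNat)) 1,
        pvLogLoopA arr.length) =
       ((List.range arr.length).map (fun i =>
          (List.range ((((List.range (arr.length + 1)).map
              (fun i => if i = 0 then (0 : Int) else (Nat.log2 i : Int))).getD arr.length 0 + 1).toNat)).map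
            (fun j =>
              if i + 2 ^ j ≤ arr.length then
                pvMaxB (PySem.List.slice arr (some (i : Int)) (some ((i + 2 ^ j : Nat) : Int)))
              else 0)),
        (List.range (arr.length + 1)).map (fun i => if i = 0 then (0 : Int) else (Nat.log2 i : Int)))
  have hlog : pvLogLoopA arr.length =
      (List.range (arr.length + 1)).map (fun i => if i = 0 then 0 else (Nat.log2 i : Int)) := by
    rw [pv_logLoopA_eq]
    apply pv_map_range_congr
    intro k _
    by_cases hk : k = 0
    · subst hk; simp [Nat.log2]
    · rw [if_neg hk]
  rw [hlog]
  have hgetN : ((List.range (arr.length + 1)).map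
        (fun i => if i = 0 then (0 : Int) else (Nat.log2 i : Int))).getD arr.length 0 =
      (Nat.log2 arr.length : Int) := by
    rw [pv_getD_map_range _ _ _ _ (by omega)]
    by_cases hN : arr.length = 0
    · simp [hN, Nat.log2]
    · rw [if_neg hN]
  have hKnat : ((Nat.log2 arr.length : Int) + 1).toNat = Nat.log2 arr.length + 1 := by
    omega
  rw [hgetN, hKnat]
  refine Prod.ext ?_ rfl
  rw [pv_stInitA_eq arr _ (by omega),
      pv_outerA_eq arr (Nat.log2 arr.length + 1) rfl (arr.length + 1) 1 le_rfl (by omega)]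
  simp only [pvTbl]
  apply pv_map_range_congr
  intro i _
  apply pv_map_range_congr
  intro j hj
  rw [if_pos hj, pv_altB_entry]
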